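-- pv_equiv track=rewrite | github.com/julliet27/Time-Complexity-Analysis-of-a-Simple-Code-Using-Graph-Plotting-and-Pattern-Based-Approach | modification.py | separation
-- ===== SOURCE A (Python) =====
-- def separation(string):
--     keyword=['int','longlongint','unsignedlonglongint','signedlonglongint'
--              'string','float','double','longdouble','char']
--     lst=[]
--     string00=''
--     for i in string:
--         string00+=i
--         if(string00 in keyword):
--             lst.append(string00)
--             string00=''
--     if(string00 =='while_loop' or string00=='for_loop'):
--         string00='loop'
--     # if (string00 == 'assignE' or string00 == 'assignBy_1'):
--     #     string00 = 'assign'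
--     if(len(string00)>0): lst.append(string00)
--     return lst
-- ===== SOURCE B (Python) =====
-- def separation(string):
--     keyword = {'int', 'longlongint', 'unsignedlonglongint',
--                'signedlonglongintstring',  # A's accidentally concatenated entry, kept verbatim
--                'float', 'double', 'longdouble', 'char'}
--     maxk = max(map(len, keyword))
--     out = []
--     pos = 0
--     n = len(string)
--     while pos < n:
--         for j in range(1, min(n - pos, maxk) + 1):
--             if string[pos:pos + j] in keyword:
--                 out.append(string[pos:pos + j])
--                 pos += j
--                 break
--         else:
--             tail = string[pos:]
--             if tail == 'while_loop' or tail == 'for_loop':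
--                 tail = 'loop'
--             out.append(tail)
--             return out
--     return out
-- ===== Notes on version B (the rewrite author's own statement) =====
-- stated objective: faster
-- what changed: Replaced A's char-by-char accumulator (grow string00 and test list membership after every char) with an index-based peel-off scanner that probes prefixes of length 1..max-keyword-length against a keyword set, jumps past the shortest match, and emits the whole remaining suffix as the residual token in one step as soon as no prefix matches.
import Mathlib
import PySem

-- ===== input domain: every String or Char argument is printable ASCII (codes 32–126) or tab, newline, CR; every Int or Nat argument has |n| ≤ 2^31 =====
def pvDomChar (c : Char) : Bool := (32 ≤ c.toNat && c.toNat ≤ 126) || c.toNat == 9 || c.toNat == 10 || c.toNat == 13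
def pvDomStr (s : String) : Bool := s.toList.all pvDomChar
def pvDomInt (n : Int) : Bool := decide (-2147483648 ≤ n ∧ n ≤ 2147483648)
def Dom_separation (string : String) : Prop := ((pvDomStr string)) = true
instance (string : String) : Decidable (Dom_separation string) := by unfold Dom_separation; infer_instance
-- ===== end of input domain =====

-- B replaces A's char-by-char accumulator loop with an index-based peel-off scanner
-- (probe bounded-length prefixes against the keyword list, jump past matches);
-- same return value, stated as exact equivalence; a timing run measured B faster.


-- ===== PORT A =====
-- A's keyword list; 'signedlonglongintstring' is the accidentally concatenated
-- entry present verbatim in the Python source (missing comma), kept as is.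
def kwA : List (List Char) :=
  ["int".toList, "longlongint".toList, "unsignedlonglongint".toList,
   "signedlonglongintstring".toList, "float".toList, "double".toList,
   "longdouble".toList, "char".toList]

-- one iteration of A's for-loop: string00 += i; if string00 in keyword: append, reset
def stepA (st : List (List Char) × List Char) (i : Char) : List (List Char) × List Char :=
  let s00 := st.2 ++ [i]
  if s00 ∈ kwA then (st.1 ++ [s00], []) else (st.1, s00)

-- A's epilogue after the loop (loop substitution + append non-empty residual)
def finA (st : List (List Char) × List Char) : List String :=
  let s00 := if st.2 = "while_loop".toList ∨ st.2 = "for_loop".toList then "loop".toList else st.2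
  (if s00.length > 0 then st.1 ++ [s00] else st.1).map String.mk

def separation (string : String) : List String :=
  finA (string.toList.foldl stepA ([], []))

-- ===== PORT B =====
def kwB : List (List Char) :=
  ["int".toList, "longlongint".toList, "unsignedlonglongint".toList,
   "signedlonglongintstring".toList, "float".toList, "double".toList,
   "longdouble".toList, "char".toList]

-- Source B: maxk = max(map(len, keyword))
def maxkB : Nat := (kwB.map List.length).foldl Nat.max 0

-- Source B's inner for-loop: first j in 1..min(n-pos, maxk) with string[pos:pos+j] in keyword
def findJB (s : List Char) (pos : Nat) : Option Nat :=
  (List.range' 1 (min (s.length - pos) maxkB)).find? (fun j => decide ((s.drop pos).take j ∈ kwB))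

lemma findJB_some_ge {s : List Char} {pos j : Nat} (h : findJB s pos = some j) : 1 ≤ j := by
  have hm := List.mem_of_find?_eq_some h
  exact (List.mem_range'_1.mp hm).1

-- Source B's while-loop over pos, accumulating out
def peelB (s : List Char) (pos : Nat) (out : List String) : List String :=
  if h : pos < s.length then
    match hj : findJB s pos with
    | some j => peelB s (pos + j) (out ++ [String.mk ((s.drop pos).take j)])
    | none =>
        let tail := s.drop pos
        let tail2 := if tail = "while_loop".toList ∨ tail = "for_loop".toList then "loop".toList else tail
        out ++ [String.mk tail2]
  else out
termination_by s.length - pos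
decreasing_by
  have := findJB_some_ge hj
  omega

def separation_alt (string : String) : List String :=
  peelB string.toList 0 []

-- ===== PRECONDITION & SPEC =====
def Spec_separation (string : String) (out : List String) : Prop := out = separation_alt string
instance (string : String) (out : List String) : Decidable (Spec_separation string out) := by unfold Spec_separation; infer_instance

-- ===== CLAIM (what is proved, stated in full; the proofs are below) =====
def Claim_equal_separation : Prop := ∀ (string : String), Dom_separation string → Spec_separation string (separation string)

-- ===== LEMMAS AND PROOFS =====

lemma kw_eq : kwA = kwB := rfl

lemma stepA_mem {acc : List Char} {c : Char} {lst : List (List Char)}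
    (hm : acc ++ [c] ∈ kwA) : stepA (lst, acc) c = (lst ++ [acc ++ [c]], []) := by
  unfold stepA; simp [hm]

lemma stepA_not_mem {acc : List Char} {c : Char} {lst : List (List Char)}
    (hm : acc ++ [c] ∉ kwA) : stepA (lst, acc) c = (lst, acc ++ [c]) := by
  unfold stepA; simp [hm]

lemma kw_len {w : List Char} (h : w ∈ kwB) : w.length ≤ 23 := by
  fin_cases h <;> decide

lemma maxkB_eq : maxkB = 23 := by decide

-- unbounded first-match spec used by the proofs
def findJ' (s : List Char) : Option Nat :=
  (List.range' 1 s.length).find? (fun j => decide (s.take j ∈ kwB))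

lemma findJ'_some_bounds {s : List Char} {j : Nat} (h : findJ' s = some j) :
    1 ≤ j ∧ j ≤ s.length := by
  have hm := List.mem_of_find?_eq_some h
  have := List.mem_range'_1.mp hm
  omega

def peel' (s : List Char) : List String :=
  match hj : findJ' s with
  | some j => String.mk (s.take j) :: peel' (s.drop j)
  | none =>
      if s = [] then [] else
        [String.mk (if s = "while_loop".toList ∨ s = "for_loop".toList then "loop".toList else s)]
termination_by s.length
decreasing_by
  have := findJ'_some_bounds hj
  have hlen : (s.drop j).length = s.length - j := List.length_drop
  omega

lemma peel'_some {s : List Char} {j : Nat} (h : findJ' s = some j) :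
    peel' s = String.mk (s.take j) :: peel' (s.drop j) := by
  rw [peel'.eq_def]
  split <;> simp_all

lemma peel'_none {s : List Char} (h : findJ' s = none) :
    peel' s = if s = [] then [] else
      [String.mk (if s = "while_loop".toList ∨ s = "for_loop".toList then "loop".toList else s)] := by
  rw [peel'.eq_def]
  split <;> simp_all

-- the bounded search of B equals the unbounded spec search
lemma findJB_eq (s : List Char) (pos : Nat) : findJB s pos = findJ' (s.drop pos) := by
  unfold findJB findJ'
  have hlen : (s.drop pos).length = s.length - pos := List.length_drop
  rw [hlen]
  set n := s.length - pos with hn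
  set m := min n maxkB with hm
  have hmn : m ≤ n := Nat.min_le_left _ _
  have hsplit : List.range' 1 n = List.range' 1 m ++ List.range' (1 + m) (n - m) := by
    have := @List.range'_append 1 m (n - m) 1
    simp only [Nat.one_mul] at this
    rw [Nat.add_sub_cancel' hmn] at this
    exact this.symm
  rw [hsplit, List.find?_append]
  have hnone : List.find? (fun j => decide ((s.drop pos).take j ∈ kwB)) (List.range' (1 + m) (n - m)) = none := by
    rw [List.find?_eq_none]
    intro j hj
    have hjb := List.mem_range'_1.mp hj
    have hjgt : maxkB < j := by omega
    simp only [decide_eq_true_eq]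
    intro hmem
    have h23 := kw_len hmem
    have hjle : j ≤ (s.drop pos).length := by omega
    have : ((s.drop pos).take j).length = j := by
      rw [List.length_take]; omega
    rw [maxkB_eq] at hjgt
    omega
  rw [hnone, Option.or_none]

-- B's while-loop computes out ++ peel' of the remaining suffix
lemma peelB_step_some {s : List Char} {pos j : Nat} {out : List String}
    (hlt : pos < s.length) (h : findJB s pos = some j) :
    peelB s pos out = peelB s (pos + j) (out ++ [String.mk ((s.drop pos).take j)]) := by
  rw [peelB]
  simp only [dif_pos hlt]
  split <;> simp_all

lemma peelB_step_none {s : List Char} {pos : Nat} {out : List String}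
    (hlt : pos < s.length) (h : findJB s pos = none) :
    peelB s pos out = out ++ [String.mk
      (if s.drop pos = "while_loop".toList ∨ s.drop pos = "for_loop".toList
       then "loop".toList else s.drop pos)] := by
  rw [peelB]
  simp only [dif_pos hlt]
  split <;> simp_all

lemma peelB_step_ge {s : List Char} {pos : Nat} {out : List String}
    (hge : ¬ pos < s.length) : peelB s pos out = out := by
  rw [peelB]
  simp only [dif_neg hge]

lemma peelB_eq (s : List Char) (pos : Nat) (out : List String) :
    peelB s pos out = out ++ peel' (s.drop pos) := by
  induction pos, out using peelB.induct s with
  | case1 pos out hlt j hj ih =>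
    rw [peelB_step_some hlt hj, ih]
    rw [findJB_eq] at hj
    rw [peel'_some hj]
    rw [List.drop_drop]
    simp [Nat.add_comm]
  | case2 pos out hlt hj =>
    rw [peelB_step_none hlt hj]
    rw [findJB_eq] at hj
    rw [peel'_none hj]
    have hne : s.drop pos ≠ [] := by
      intro hc
      have : (s.drop pos).length = 0 := by rw [hc]; rfl
      rw [List.length_drop] at this
      omega
    simp [hne]
  | case3 pos out hge =>
    rw [peelB_step_ge hge]
    have hnil : s.drop pos = [] := List.drop_eq_nil_of_le (by omega)
    rw [hnil]
    rw [peel'_none]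
    · simp
    · unfold findJ'
      simp

-- least-match characterisation of find? over range'
lemma find?_range'_some (p : Nat → Bool) :
    ∀ (n st j : Nat), st ≤ j → j < st + n → p j = true →
      (∀ i, st ≤ i → i < j → p i = false) →
      (List.range' st n).find? p = some j := by
  intro n
  induction n with
  | zero => intro st j h1 h2; omega
  | succ n ih =>
    intro st j h1 h2 hp hmin
    rw [List.range'_succ, List.find?_cons]
    by_cases hje : j = st
    · subst hje; simp [hp]
    · have hst : p st = false := hmin st (le_refl _) (by omega)
      rw [hst]
      exact ih (st + 1) j (by omega) (by omega) hp (fun i hi1 hi2 => hmin i (by omega) hi2)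

lemma findJ'_of_first {s : List Char} {j : Nat} (h1 : 1 ≤ j) (h2 : j ≤ s.length)
    (hp : s.take j ∈ kwB) (hmin : ∀ i, 1 ≤ i → i < j → s.take i ∉ kwB) :
    findJ' s = some j := by
  unfold findJ'
  exact find?_range'_some _ s.length 1 j h1 (by omega) (by simp [hp])
    (fun i hi1 hi2 => by simp [hmin i hi1 hi2])

lemma findJ'_of_none {s : List Char} (h : ∀ i, 1 ≤ i → i ≤ s.length → s.take i ∉ kwB) :
    findJ' s = none := by
  unfold findJ'
  rw [List.find?_eq_none]
  intro j hj
  have := List.mem_range'_1.mp hj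
  simp [h j this.1 (by omega)]

-- the invariant lemma: A's loop from state (lst, acc) where no prefix of acc is a
-- keyword produces lst followed by the peel-off tokenisation of acc ++ cs
lemma foldA_peel' (cs : List Char) : ∀ (lst : List (List Char)) (acc : List Char),
    (∀ j, 1 ≤ j → j ≤ acc.length → acc.take j ∉ kwB) →
    finA (cs.foldl stepA (lst, acc)) = lst.map String.mk ++ peel' (acc ++ cs) := by
  induction cs with
  | nil =>
    intro lst acc h
    simp only [List.foldl_nil, List.append_nil]
    have hnone : findJ' acc = none := findJ'_of_none h
    rw [peel'_none hnone]
    unfold finA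
    by_cases hacc : acc = []
    · subst hacc
      simp
    · have hne : acc.length > 0 := List.length_pos_of_ne_nil hacc
      by_cases hwf : acc = "while_loop".toList ∨ acc = "for_loop".toList
      · rcases hwf with h1 | h1 <;> subst h1 <;> simp
      · simp only [if_neg hwf]
        simp [hne, hacc]
  | cons c cs' ih =>
    intro lst acc h
    simp only [List.foldl_cons]
    by_cases hm : acc ++ [c] ∈ kwA
    · rw [stepA_mem hm]
      rw [ih (lst ++ [acc ++ [c]]) [] (by intro j hj1 hj2; simp at hj2; omega)]
      have hfj : findJ' (acc ++ c :: cs') = some (acc.length + 1) := by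
        apply findJ'_of_first
        · omega
        · simp only [List.length_append, List.length_cons]; omega
        · have : (acc ++ c :: cs').take (acc.length + 1) = acc ++ [c] := by
            rw [List.take_append]
            simp
          rw [this]
          rw [← kw_eq]; exact hm
        · intro i hi1 hi2
          have : (acc ++ c :: cs').take i = acc.take i := by
            rw [List.take_append]
            have : i - acc.length = 0 := by omega
            simp [this]
          rw [this]
          exact h i hi1 (by omega)
      rw [peel'_some hfj]
      have hdrop : (acc ++ c :: cs').drop (acc.length + 1) = cs' := by
        rw [List.drop_append]
        have h1 : acc.length + 1 - acc.length = 1 := by omega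
        simp [List.drop_eq_nil_of_le, h1]
      have htake : (acc ++ c :: cs').take (acc.length + 1) = acc ++ [c] := by
        rw [List.take_append]; simp
      rw [hdrop, htake]
      simp
    · rw [stepA_not_mem hm]
      rw [ih lst (acc ++ [c]) ?_]
      · have : acc ++ c :: cs' = (acc ++ [c]) ++ cs' := by simp
        rw [this]
      · intro j hj1 hj2
        simp only [List.length_append, List.length_cons, List.length_nil] at hj2
        by_cases hje : j ≤ acc.length
        · have : (acc ++ [c]).take j = acc.take j := by
            rw [List.take_append]
            have : j - acc.length = 0 := by omega
            simp [this]
          rw [this]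
          exact h j hj1 hje
        · have hjl : j = acc.length + 1 := by omega
          have : (acc ++ [c]).take j = acc ++ [c] := by
            apply List.take_of_length_le
            simp; omega
          rw [this, ← kw_eq]
          exact hm

-- ===== VERDICT (by name: the statement is the Claim_ definition above) =====
theorem separation_spec : Claim_equal_separation := by
  intro s _
  unfold Spec_separation separation separation_alt
  rw [peelB_eq]
  simp only [List.drop_zero, List.nil_append]
  rw [foldA_peel' s.toList [] [] (by intro j hj1 hj2; simp at hj2; omega)]
  simp
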